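-- pv_equiv track=rewrite | github.com/abertsch72/minimum-bayes-risk | src/recom_search/scripts/run_eval.py | adjust_batch_size
-- ===== SOURCE A (Python) =====
-- def adjust_batch_size(max_len, task, dataset):
--     if task == 'sum':
--         bs = max_len * 16 / 25
--
--     elif dataset == 'en-fr':
--         bs = 12
--     elif dataset == 'zh-en':
--         bs = 12
--     elif dataset == 'fr-en':
--         bs = 12
--     else:
--         raise NotImplementedError
--     # for dbs, we set ngroup to be 4
--
--     group = 4
--     bs = int(bs)
--     while bs % group != 0:
--         bs -= 1
--     return max(bs,1)
-- ===== SOURCE B (Python) =====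
-- def adjust_batch_size(max_len, task, dataset):
--     if task == 'sum':
--         bs = int(max_len * 16 / 25)
--     elif dataset in ('en-fr', 'zh-en', 'fr-en'):
--         bs = 12
--     else:
--         raise NotImplementedError
--     return max(bs - bs % 4, 1)
-- ===== Notes on version B (the rewrite author's own statement) =====
-- stated objective: simpler
-- what changed: Replaced the decrementing while-loop that rounds bs down to a multiple of 4 with the closed form bs - bs % 4, and collapsed the three identical dataset branches into one membership test.
import Mathlib
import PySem

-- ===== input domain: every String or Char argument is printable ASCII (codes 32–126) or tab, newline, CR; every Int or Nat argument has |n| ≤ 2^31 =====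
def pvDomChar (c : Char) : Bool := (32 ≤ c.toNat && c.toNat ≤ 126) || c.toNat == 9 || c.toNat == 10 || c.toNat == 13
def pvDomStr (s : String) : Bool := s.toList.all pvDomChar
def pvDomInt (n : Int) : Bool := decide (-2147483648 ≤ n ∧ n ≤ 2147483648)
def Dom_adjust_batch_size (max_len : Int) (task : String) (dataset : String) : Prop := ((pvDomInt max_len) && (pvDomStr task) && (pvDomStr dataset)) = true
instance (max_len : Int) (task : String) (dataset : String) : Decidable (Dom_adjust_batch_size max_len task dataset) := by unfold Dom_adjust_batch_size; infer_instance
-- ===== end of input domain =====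

-- B replaces A's decrementing round-down loop by the closed form bs - bs % 4 (objective: simpler).

-- ===== PORT A =====
-- the `while bs % 4 != 0: bs -= 1` loop, literally
def pvLoopA (bs : Int) : Int :=
  if PySem.Int.mod bs 4 = 0 then bs else pvLoopA (bs - 1)
termination_by (PySem.Int.mod bs 4).toNat
decreasing_by
  simp only [PySem.Int.mod_eq_emod_of_pos (show (0:Int) < 4 by norm_num)] at *
  omega

-- `int(max_len * 16 / 25)` is ported as truncating integer division Int.tdiv:
-- exact on the domain |max_len| ≤ 2^31, where the float quotient's rounding error
-- is far smaller than the 1/25 distance of the exact value to any integer.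
def adjust_batch_size (max_len : Int) (task : String) (dataset : String) : Int :=
  let bs : Int :=
    if task = "sum" then Int.tdiv (max_len * 16) 25
    else if dataset = "en-fr" then 12
    else if dataset = "zh-en" then 12
    else if dataset = "fr-en" then 12
    else 0  -- unreachable under Pre_ (Python raises NotImplementedError)
  max (pvLoopA bs) 1

-- ===== PORT B =====
def adjust_batch_size_alt (max_len : Int) (task : String) (dataset : String) : Int :=
  let bs : Int :=
    if task = "sum" then Int.tdiv (max_len * 16) 25
    else if dataset = "en-fr" ∨ dataset = "zh-en" ∨ dataset = "fr-en" then 12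
    else 0  -- unreachable under Pre_ (Python raises NotImplementedError)
  max (bs - PySem.Int.mod bs 4) 1

-- ===== PRECONDITION & SPEC =====
-- Pre_ excludes exactly the inputs on which A raises NotImplementedError.
def Pre_adjust_batch_size (max_len : Int) (task : String) (dataset : String) : Prop :=
  task = "sum" ∨ dataset = "en-fr" ∨ dataset = "zh-en" ∨ dataset = "fr-en"
instance (max_len : Int) (task : String) (dataset : String) : Decidable (Pre_adjust_batch_size max_len task dataset) := by unfold Pre_adjust_batch_size; infer_instance

def pvWitness_adjust_batch_size : Int × String × String := (40, "sum", "xsum")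

def Spec_adjust_batch_size (max_len : Int) (task : String) (dataset : String) (out : Int) : Prop := out = adjust_batch_size_alt max_len task dataset
instance (max_len : Int) (task : String) (dataset : String) (out : Int) : Decidable (Spec_adjust_batch_size max_len task dataset out) := by unfold Spec_adjust_batch_size; infer_instance

-- ===== CLAIM (what is proved, stated in full; the proofs are below) =====
def Claim_equal_adjust_batch_size : Prop := ∀ (max_len : Int) (task : String) (dataset : String), Dom_adjust_batch_size max_len task dataset → Pre_adjust_batch_size max_len task dataset → Spec_adjust_batch_size max_len task dataset (adjust_batch_size max_len task dataset)

-- ===== LEMMAS AND PROOFS =====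
theorem pvLoopA_closed (bs : Int) : pvLoopA bs = bs - PySem.Int.mod bs 4 := by
  have hm : ∀ x : Int, PySem.Int.mod x 4 = x % 4 :=
    fun x => PySem.Int.mod_eq_emod_of_pos (show (0:Int) < 4 by norm_num)
  have key : ∀ (n : Nat) (b : Int), (PySem.Int.mod b 4).toNat = n →
      pvLoopA b = b - PySem.Int.mod b 4 := by
    intro n
    induction n with
    | zero =>
      intro b hb
      have h0 : PySem.Int.mod b 4 = 0 := by rw [hm] at hb ⊢; omega
      rw [pvLoopA, if_pos h0, h0]; ring
    | succ k ih =>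
      intro b hb
      have hne : PySem.Int.mod b 4 ≠ 0 := by rw [hm] at hb ⊢; omega
      have hstep : (PySem.Int.mod (b - 1) 4).toNat = k := by
        rw [hm] at hb hne ⊢; omega
      rw [pvLoopA, if_neg hne, ih (b - 1) hstep, hm, hm] at *
      omega
  exact key (PySem.Int.mod bs 4).toNat bs rfl

-- ===== VERDICT (by name: the statement is the Claim_ definition above) =====
theorem adjust_batch_size_spec : Claim_equal_adjust_batch_size := by
  intro max_len task dataset _ hpre
  unfold Spec_adjust_batch_size adjust_batch_size adjust_batch_size_alt
  simp only [pvLoopA_closed]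
  rcases hpre with h | h | h | h <;> simp [h]
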